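-- pv_equiv track=rewrite | github.com/sutaC/AdventOfCode | year2024/day2/main-v2.py | getInvalidDiff
-- ===== SOURCE A (Python) =====
-- def isNumPositive(num: int) -> bool:
--     return num >= 0
--
-- def getInvalidDiff(diffs: list[int]) -> int:
--     for i, diff in enumerate(diffs):
--         if abs(diff) > 3 or abs(diff) < 1:
--             return i
--     for i in range(1, len(diffs)):
--         if isNumPositive(diffs[i-1]) != isNumPositive(diffs[i]):
--             return i
--     return -1
-- ===== SOURCE B (Python) =====
-- def getInvalidDiff(diffs: list[int]) -> int:
--     sign_idx = -1
--     prev = None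
--     for i, diff in enumerate(diffs):
--         if abs(diff) > 3 or abs(diff) < 1:
--             return i
--         if prev is not None and sign_idx == -1 and (prev >= 0) != (diff >= 0):
--             sign_idx = i
--         prev = diff
--     return sign_idx
-- ===== Notes on version B (the rewrite author's own statement) =====
-- stated objective: simpler
-- what changed: Fuses A's two sequential passes (magnitude scan, then index-based sign-change scan) into one enumerate pass that tracks the previous element and remembers the first sign-change index, returning immediately on a magnitude violation so magnitude keeps priority.
import Mathlib
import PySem

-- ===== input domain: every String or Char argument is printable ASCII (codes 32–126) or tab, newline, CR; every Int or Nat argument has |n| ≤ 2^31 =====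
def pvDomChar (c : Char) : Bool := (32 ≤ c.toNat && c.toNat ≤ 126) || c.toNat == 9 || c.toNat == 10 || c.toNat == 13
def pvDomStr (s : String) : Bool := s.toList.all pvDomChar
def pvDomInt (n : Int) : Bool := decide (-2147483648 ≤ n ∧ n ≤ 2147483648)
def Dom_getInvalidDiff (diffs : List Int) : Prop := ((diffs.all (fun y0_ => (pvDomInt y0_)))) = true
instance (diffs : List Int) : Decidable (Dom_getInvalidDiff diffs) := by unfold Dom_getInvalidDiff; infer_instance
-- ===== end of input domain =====

-- B fuses A's two sequential passes into one pass tracking the previous element; simpler, same O(n) cost.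

-- ===== PORT A =====
def isNumPositive (num : Int) : Bool := num ≥ 0

-- first loop: for i, diff in enumerate(diffs): if abs(diff) > 3 or abs(diff) < 1: return i
def getInvalidDiffLoop1 (k : Nat) : List Int → Option Int
  | [] => none
  | d :: rest => if |d| > 3 ∨ |d| < 1 then some (k : Int) else getInvalidDiffLoop1 (k + 1) rest

-- second loop: for i in range(1, len(diffs)): … (i always a valid index, so getD's default is never used)
def getInvalidDiffLoop2 (diffs : List Int) (i : Nat) : Int :=
  if _h : i < diffs.length then
    if isNumPositive (diffs.getD (i - 1) 0) != isNumPositive (diffs.getD i 0) then (i : Int)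
    else getInvalidDiffLoop2 diffs (i + 1)
  else -1
termination_by diffs.length - i

def getInvalidDiff (diffs : List Int) : Int :=
  match getInvalidDiffLoop1 0 diffs with
  | some i => i
  | none => getInvalidDiffLoop2 diffs 1

-- ===== PORT B =====
def getInvalidDiffAltLoop (k : Nat) (prev : Option Int) (signIdx : Int) : List Int → Int
  | [] => signIdx
  | d :: rest =>
    if |d| > 3 ∨ |d| < 1 then (k : Int)
    else
      getInvalidDiffAltLoop (k + 1) (some d)
        (if (match prev with
             | none => false
             | some p => signIdx == -1 && (decide (p ≥ 0) != decide (d ≥ 0))) = true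
         then (k : Int) else signIdx) rest

def getInvalidDiff_alt (diffs : List Int) : Int :=
  getInvalidDiffAltLoop 0 none (-1) diffs

-- ===== PRECONDITION & SPEC =====
def Spec_getInvalidDiff (diffs : List Int) (out : Int) : Prop := out = getInvalidDiff_alt diffs
instance (diffs : List Int) (out : Int) : Decidable (Spec_getInvalidDiff diffs out) := by unfold Spec_getInvalidDiff; infer_instance

-- ===== CLAIM (what is proved, stated in full; the proofs are below) =====
def Claim_equal_getInvalidDiff : Prop := ∀ (diffs : List Int), Dom_getInvalidDiff diffs → Spec_getInvalidDiff diffs (getInvalidDiff diffs)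

-- ===== LEMMAS AND PROOFS =====

-- reference form of "first sign change from index k on, previous element p"
def fsRef (p : Int) (k : Nat) : List Int → Int
  | [] => -1
  | d :: r => if (decide (p ≥ 0) != decide (d ≥ 0)) = true then (k : Int) else fsRef d (k + 1) r

-- if the first loop of A finds a bad magnitude, B returns the same index
theorem altLoop_of_loop1_some (l : List Int) : ∀ (k : Nat) (m : Int) (prev : Option Int) (s : Int),
    getInvalidDiffLoop1 k l = some m → getInvalidDiffAltLoop k prev s l = m := by
  induction l with
  | nil => intro k m prev s h; simp [getInvalidDiffLoop1] at h
  | cons d r ih =>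
    intro k m prev s h
    simp only [getInvalidDiffLoop1] at h
    simp only [getInvalidDiffAltLoop]
    by_cases hb : |d| > 3 ∨ |d| < 1
    · rw [if_pos hb] at h; rw [if_pos hb]; exact Option.some.inj h
    · rw [if_neg hb] at h; rw [if_neg hb]; exact ih _ _ _ _ h

-- with no bad magnitude and signIdx already set (≠ -1), B just returns signIdx
theorem altLoop_of_set (l : List Int) : ∀ (k : Nat) (prev : Option Int) (s : Int),
    getInvalidDiffLoop1 k l = none → s ≠ -1 → getInvalidDiffAltLoop k prev s l = s := by
  induction l with
  | nil => intro k prev s _ _; simp [getInvalidDiffAltLoop]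
  | cons d r ih =>
    intro k prev s h hs
    simp only [getInvalidDiffLoop1] at h
    by_cases hb : |d| > 3 ∨ |d| < 1
    · rw [if_pos hb] at h; simp at h
    · rw [if_neg hb] at h
      simp only [getInvalidDiffAltLoop]
      rw [if_neg hb]
      have hset : (if (match prev with
             | none => false
             | some p => s == -1 && (decide (p ≥ 0) != decide (d ≥ 0))) = true
         then (k : Int) else s) = s := by
        cases prev with
        | none => simp
        | some p => simp [hs]
      rw [hset]
      exact ih _ _ _ h hs

-- with no bad magnitude and signIdx = -1, B computes the first sign change (reference form)
theorem altLoop_fs (l : List Int) : ∀ (k : Nat) (p : Int),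
    getInvalidDiffLoop1 k l = none →
    getInvalidDiffAltLoop k (some p) (-1) l = fsRef p k l := by
  induction l with
  | nil => intro k p _; simp [getInvalidDiffAltLoop, fsRef]
  | cons d r ih =>
    intro k p h
    simp only [getInvalidDiffLoop1] at h
    by_cases hb : |d| > 3 ∨ |d| < 1
    · rw [if_pos hb] at h; simp at h
    · rw [if_neg hb] at h
      simp only [getInvalidDiffAltLoop, fsRef]
      rw [if_neg hb]
      simp only [beq_self_eq_true, Bool.true_and]
      by_cases hsgn : (decide (p ≥ 0) != decide (d ≥ 0)) = true
      · rw [if_pos hsgn, if_pos hsgn]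
        exact altLoop_of_set r (k + 1) (some d) (k : Int) h (by omega)
      · rw [if_neg hsgn, if_neg hsgn]
        exact ih (k + 1) d h

-- A's second loop, started at a valid index k, equals the reference first-sign-change scan
theorem loop2_fs (diffs : List Int) : ∀ (k : Nat), 0 < k → k ≤ diffs.length →
    getInvalidDiffLoop2 diffs k = fsRef (diffs.getD (k - 1) 0) k (diffs.drop k) := by
  intro k hk hkle
  induction hn : diffs.length - k generalizing k with
  | zero =>
    have hk' : k = diffs.length := by omega
    subst hk'
    rw [getInvalidDiffLoop2]
    simp [fsRef]
  | succ n ih =>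
    have hklt : k < diffs.length := by omega
    rw [getInvalidDiffLoop2, dif_pos hklt]
    have hdrop : diffs.drop k = diffs.getD k 0 :: diffs.drop (k + 1) := by
      rw [List.getD_eq_getElem _ _ hklt]
      exact (List.drop_eq_getElem_cons hklt)
    rw [hdrop, fsRef]
    by_cases hc : (decide (diffs.getD (k - 1) 0 ≥ 0) != decide (diffs.getD k 0 ≥ 0)) = true
    · rw [if_pos hc, if_pos (show (isNumPositive (diffs.getD (k - 1) 0) != isNumPositive (diffs.getD k 0)) = true from hc)]
    · rw [if_neg hc, if_neg (show ¬ (isNumPositive (diffs.getD (k - 1) 0) != isNumPositive (diffs.getD k 0)) = true from hc)]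
      have := ih (k + 1) (by omega) (by omega) (by omega)
      simpa using this

-- ===== VERDICT (by name: the statement is the Claim_ definition above) =====
theorem getInvalidDiff_spec : Claim_equal_getInvalidDiff := by
  intro diffs _
  unfold Spec_getInvalidDiff getInvalidDiff getInvalidDiff_alt
  cases hl : getInvalidDiffLoop1 0 diffs with
  | some m => exact (altLoop_of_loop1_some diffs 0 m none (-1) hl).symm
  | none =>
    cases diffs with
    | nil => simp [getInvalidDiffLoop2, getInvalidDiffAltLoop]
    | cons d r =>
      simp only [getInvalidDiffLoop1] at hl
      by_cases hb : |d| > 3 ∨ |d| < 1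
      · rw [if_pos hb] at hl; simp at hl
      · rw [if_neg hb] at hl
        show getInvalidDiffLoop2 (d :: r) 1 = getInvalidDiffAltLoop 0 none (-1) (d :: r)
        have h2 := loop2_fs (d :: r) 1 (by omega) (by simp)
        simp at h2
        rw [h2]
        simp only [getInvalidDiffAltLoop]
        rw [if_neg hb]
        exact (altLoop_fs r 1 d hl).symm
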